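-- pv_equiv track=rewrite | github.com/HigashikataZhangsuke/PPFaaS | PPFaaS/BackEnd/search/searchp.py | searchmaxb
-- ===== SOURCE A (Python) =====
-- def searchmaxb(dict,parallelism,rate,Usememory):
--     if Usememory ==True:
--         #For side models
--         pass
--     else:
--         #For main models
--         min_key = None
--         min_val = None
--         for key, value in dict.items():
--             val = value
--             if val > rate and (min_val is None or val < min_val):
--                 min_val = val
--                 min_key = key
--         #Rate too high, use 8 batch as default
--         if min_key == None:
--             min_key = 8
--         return min_key
-- ===== SOURCE B (Python) =====
-- def searchmaxb(dict, parallelism, rate, Usememory):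
--     if Usememory == True:
--         # For side models
--         return None
--     # For main models: stable-sort the items ascending by value; the first
--     # item whose value exceeds rate is then the value-minimal candidate,
--     # and stability makes the earliest-inserted key win on value ties.
--     for key, value in sorted(dict.items(), key=lambda kv: kv[1]):
--         if value > rate:
--             return key
--     # Rate too high, use 8 batch as default
--     return 8
-- ===== Notes on version B (the rewrite author's own statement) =====
-- stated objective: alternative
-- what changed: Replaces the fused filter+argmin loop with two optional accumulators by a stable sort of the items ascending by value followed by a linear scan returning the first item exceeding rate (stability reproduces the first-wins tie-break), with 8 as the no-candidate default.
import Mathlib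
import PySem

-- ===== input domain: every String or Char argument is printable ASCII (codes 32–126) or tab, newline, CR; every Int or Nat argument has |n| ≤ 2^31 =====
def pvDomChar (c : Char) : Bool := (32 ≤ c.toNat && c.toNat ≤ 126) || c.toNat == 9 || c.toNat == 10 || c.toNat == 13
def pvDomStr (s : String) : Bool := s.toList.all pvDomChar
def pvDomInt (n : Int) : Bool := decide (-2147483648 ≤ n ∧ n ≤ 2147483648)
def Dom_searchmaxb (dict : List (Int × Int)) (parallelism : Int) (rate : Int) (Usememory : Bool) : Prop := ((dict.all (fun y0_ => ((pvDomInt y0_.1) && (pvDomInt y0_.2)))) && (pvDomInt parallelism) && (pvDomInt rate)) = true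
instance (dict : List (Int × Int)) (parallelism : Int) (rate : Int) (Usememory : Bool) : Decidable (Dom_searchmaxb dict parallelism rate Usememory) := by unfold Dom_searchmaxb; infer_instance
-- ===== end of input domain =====

-- B replaces A's fused filter+argmin loop (two optional accumulators) by a stable sort
-- of the items ascending by value followed by a scan for the first item exceeding rate;
-- an alternative algorithm of different shape, not claimed faster.


-- ===== PORT A =====
-- A's loop body: update (min_key, min_val) when val > rate and (min_val is None or val < min_val)
def searchmaxbStep (rate : Int) (s : Option Int × Option Int) (kv : Int × Int) : Option Int × Option Int :=
  if kv.2 > rate ∧ (s.2 = none ∨ ∃ m, s.2 = some m ∧ kv.2 < m) then (some kv.1, some kv.2) else s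

def searchmaxb (dict : List (Int × Int)) (parallelism : Int) (rate : Int) (Usememory : Bool) : Option Int :=
  if Usememory = true then
    none
  else
    let st := dict.foldl (searchmaxbStep rate) (none, none)
    match st.1 with
    | none => some 8   -- min_key = 8 default
    | some k => some k

-- ===== PORT B =====
-- B's scan: return the key of the first item with value > rate, else the default 8
def searchmaxbScan (rate : Int) : List (Int × Int) → Option Int
  | [] => some 8
  | kv :: t => if kv.2 > rate then some kv.1 else searchmaxbScan rate t

def searchmaxb_alt (dict : List (Int × Int)) (parallelism : Int) (rate : Int) (Usememory : Bool) : Option Int :=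
  if Usememory = true then
    none
  else
    searchmaxbScan rate (PySem.List.sorted dict (fun kv => kv.2) false)

-- ===== PRECONDITION & SPEC =====
def Spec_searchmaxb (dict : List (Int × Int)) (parallelism : Int) (rate : Int) (Usememory : Bool) (out : Option Int) : Prop := out = searchmaxb_alt dict parallelism rate Usememory
instance (dict : List (Int × Int)) (parallelism : Int) (rate : Int) (Usememory : Bool) (out : Option Int) : Decidable (Spec_searchmaxb dict parallelism rate Usememory out) := by unfold Spec_searchmaxb; infer_instance

-- ===== CLAIM (what is proved, stated in full; the proofs are below) =====
def Claim_equal_searchmaxb : Prop := ∀ (dict : List (Int × Int)) (parallelism : Int) (rate : Int) (Usememory : Bool), Dom_searchmaxb dict parallelism rate Usememory → Spec_searchmaxb dict parallelism rate Usememory (searchmaxb dict parallelism rate Usememory)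

-- ===== LEMMAS AND PROOFS =====

-- abbreviate the insertion used by PySem's stable sort with key kv.2
def pvIns (x : Int × Int) (ys : List (Int × Int)) : List (Int × Int) :=
  PySem.List.insertBy (fun a b => decide (a.2 < b.2)) x ys

theorem pvIns_nil (x : Int × Int) : pvIns x [] = [x] := rfl

theorem pvIns_cons (x y : Int × Int) (t : List (Int × Int)) :
    pvIns x (y :: t) = if x.2 < y.2 then x :: y :: t else y :: pvIns x t := by
  simp [pvIns, PySem.List.insertBy]

-- A's running-min accumulator, as a step over full items
def searchmaxbMinStep (s : Option (Int × Int)) (kv : Int × Int) : Option (Int × Int) :=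
  match s with
  | none => some kv
  | some m => if kv.2 < m.2 then some kv else some m

-- (1) A's fold over dict equals the min-step fold over the filtered candidates
theorem searchmaxb_loop_eq (rate : Int) (t : List (Int × Int)) :
    ∀ s : Option (Int × Int),
      t.foldl (searchmaxbStep rate) (s.map Prod.fst, s.map Prod.snd)
        = (((t.filter (fun kv => kv.2 > rate)).foldl searchmaxbMinStep s).map Prod.fst,
           ((t.filter (fun kv => kv.2 > rate)).foldl searchmaxbMinStep s).map Prod.snd) := by
  induction t with
  | nil => intro s; simp
  | cons kv t ih =>
    intro s
    rw [List.foldl_cons]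
    by_cases hr : kv.2 > rate
    · rw [List.filter_cons_of_pos (by simpa using hr), List.foldl_cons]
      cases s with
      | none =>
        have hA : searchmaxbStep rate (Option.map Prod.fst (none : Option (Int × Int)), Option.map Prod.snd (none : Option (Int × Int))) kv = (some kv.1, some kv.2) := by
          simp [searchmaxbStep, hr]
        have hB : searchmaxbMinStep none kv = some kv := rfl
        rw [hA, hB]
        exact ih (some kv)
      | some m =>
        by_cases hlt : kv.2 < m.2
        · have hA : searchmaxbStep rate (Option.map Prod.fst (some m), Option.map Prod.snd (some m)) kv = (some kv.1, some kv.2) := by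
            simp only [Option.map_some, searchmaxbStep]
            rw [if_pos ⟨hr, Or.inr ⟨m.2, rfl, hlt⟩⟩]
          have hB : searchmaxbMinStep (some m) kv = some kv := by
            simp [searchmaxbMinStep, hlt]
          rw [hA, hB]
          exact ih (some kv)
        · have hA : searchmaxbStep rate (Option.map Prod.fst (some m), Option.map Prod.snd (some m)) kv = (Option.map Prod.fst (some m), Option.map Prod.snd (some m)) := by
            simp only [Option.map_some, searchmaxbStep]
            rw [if_neg]
            rintro ⟨-, h | ⟨x, hx, hlt'⟩⟩
            · simp at h
            · exact hlt ((Option.some.injEq _ _ ▸ hx : m.2 = x) ▸ hlt')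
          have hB : searchmaxbMinStep (some m) kv = some m := by
            simp [searchmaxbMinStep, hlt]
          rw [hA, hB]
          exact ih (some m)
    · rw [List.filter_cons_of_neg (by simpa using hr)]
      have hA : searchmaxbStep rate (Option.map Prod.fst s, Option.map Prod.snd s) kv = (Option.map Prod.fst s, Option.map Prod.snd s) := by
        simp only [searchmaxbStep]
        rw [if_neg]
        rintro ⟨h, -⟩
        exact hr h
      rw [hA]
      exact ih s

-- (2) the head of an insertion is exactly one min-step
theorem head?_pvIns (x : Int × Int) (ys : List (Int × Int)) :
    (pvIns x ys).head? = searchmaxbMinStep ys.head? x := by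
  cases ys with
  | nil => rfl
  | cons y t =>
    rw [pvIns_cons]
    by_cases h : x.2 < y.2 <;> simp [h, searchmaxbMinStep]

-- hence head? of the sort-building fold is the min-step fold
theorem head?_foldl_pvIns (xs : List (Int × Int)) :
    ∀ acc : List (Int × Int),
      (xs.foldl (fun a x => pvIns x a) acc).head? = xs.foldl searchmaxbMinStep acc.head? := by
  induction xs with
  | nil => intro acc; rfl
  | cons x t ih =>
    intro acc
    rw [List.foldl_cons, List.foldl_cons, ih, head?_pvIns]

-- (3) insertion into a value-sorted list commutes with filtering
theorem filter_pvIns (p : Int × Int → Bool) (x : Int × Int) (ys : List (Int × Int))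
    (hys : ys.Pairwise (fun a b => a.2 ≤ b.2)) :
    (pvIns x ys).filter p = if p x then pvIns x (ys.filter p) else ys.filter p := by
  induction ys with
  | nil =>
    rw [pvIns_nil]
    by_cases hx : p x <;> simp [hx, pvIns_nil]
  | cons y t ih =>
    have hyt : ∀ z ∈ t, y.2 ≤ z.2 := (List.pairwise_cons.mp hys).1
    have ht : t.Pairwise (fun a b => a.2 ≤ b.2) := (List.pairwise_cons.mp hys).2
    rw [pvIns_cons]
    by_cases hlt : x.2 < y.2
    · rw [if_pos hlt]
      by_cases hx : p x
      · rw [if_pos hx, List.filter_cons_of_pos hx]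
        by_cases hy : p y
        · rw [List.filter_cons_of_pos hy, pvIns_cons, if_pos hlt]
        · rw [List.filter_cons_of_neg hy]
          cases hft : t.filter p with
          | nil => rfl
          | cons z s =>
            have hz : z ∈ t := List.mem_of_mem_filter (hft ▸ List.mem_cons_self)
            rw [pvIns_cons, if_pos (lt_of_lt_of_le hlt (hyt z hz))]
      · rw [if_neg hx, List.filter_cons_of_neg hx]
    · rw [if_neg hlt]
      by_cases hy : p y
      · rw [List.filter_cons_of_pos hy, List.filter_cons_of_pos hy, ih ht]
        by_cases hx : p x
        · rw [if_pos hx, if_pos hx, pvIns_cons, if_neg hlt]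
        · rw [if_neg hx, if_neg hx]
      · rw [List.filter_cons_of_neg hy, List.filter_cons_of_neg hy, ih ht]

-- insertion preserves the value-sorted invariant
theorem pairwise_pvIns (x : Int × Int) (ys : List (Int × Int))
    (hys : ys.Pairwise (fun a b => a.2 ≤ b.2)) :
    (pvIns x ys).Pairwise (fun a b => a.2 ≤ b.2) := by
  induction ys with
  | nil => simp [pvIns_nil]
  | cons y t ih =>
    have hyt : ∀ z ∈ t, y.2 ≤ z.2 := (List.pairwise_cons.mp hys).1
    have ht : t.Pairwise (fun a b => a.2 ≤ b.2) := (List.pairwise_cons.mp hys).2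
    rw [pvIns_cons]
    by_cases hlt : x.2 < y.2
    · rw [if_pos hlt]
      refine List.pairwise_cons.mpr ⟨?_, hys⟩
      intro z hz
      rcases List.mem_cons.mp hz with h | h
      · exact le_of_lt (h ▸ hlt)
      · exact le_of_lt (lt_of_lt_of_le hlt (hyt z h))
    · rw [if_neg hlt]
      refine List.pairwise_cons.mpr ⟨?_, ih ht⟩
      intro z hz
      rcases (PySem.List.mem_insertBy _ x z t).mp hz with h | h
      · exact h ▸ le_of_not_gt hlt
      · exact hyt z h

-- the sort-building fold commutes with filtering (sorted accumulator)
theorem filter_foldl_pvIns (p : Int × Int → Bool) (xs : List (Int × Int)) :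
    ∀ acc : List (Int × Int), acc.Pairwise (fun a b => a.2 ≤ b.2) →
      (xs.foldl (fun a x => pvIns x a) acc).filter p
        = (xs.filter p).foldl (fun a x => pvIns x a) (acc.filter p) := by
  induction xs with
  | nil => intro acc _; rfl
  | cons x t ih =>
    intro acc hacc
    rw [List.foldl_cons, ih (pvIns x acc) (pairwise_pvIns x acc hacc), filter_pvIns p x acc hacc]
    by_cases hx : p x
    · rw [if_pos hx, List.filter_cons_of_pos hx, List.foldl_cons]
    · rw [if_neg hx, List.filter_cons_of_neg hx]

-- (4) B's scan is 8-or-first over the filtered list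
theorem searchmaxbScan_eq (rate : Int) (l : List (Int × Int)) :
    searchmaxbScan rate l
      = match (l.filter (fun kv => kv.2 > rate)).head? with
        | none => some 8
        | some kv => some kv.1 := by
  induction l with
  | nil => rfl
  | cons kv t ih =>
    by_cases h : kv.2 > rate
    · rw [List.filter_cons_of_pos (by simpa using h)]
      simp [searchmaxbScan, h]
    · rw [List.filter_cons_of_neg (by simpa using h)]
      simpa [searchmaxbScan, h] using ih

-- PySem's sort with key kv.2 is the pvIns-building fold
theorem sorted_eq_pvIns_fold (xs : List (Int × Int)) :
    PySem.List.sorted xs (fun kv => kv.2) false = xs.foldl (fun a x => pvIns x a) [] := rfl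

-- ===== VERDICT (by name: the statement is the Claim_ definition above) =====
theorem searchmaxb_spec : Claim_equal_searchmaxb := by
  intro dict parallelism rate Usememory _
  unfold Spec_searchmaxb searchmaxb searchmaxb_alt
  cases Usememory with
  | true => simp
  | false =>
    simp only [Bool.false_eq_true, if_neg, not_false_eq_true]
    rw [searchmaxbScan_eq, sorted_eq_pvIns_fold,
        filter_foldl_pvIns (fun kv => kv.2 > rate) dict [] List.Pairwise.nil,
        head?_foldl_pvIns]
    have h := searchmaxb_loop_eq rate dict none
    simp only [Option.map_none, gt_iff_lt] at h
    simp only [gt_iff_lt]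
    rw [h]
    cases hf : (dict.filter (fun kv => decide (rate < kv.2))).foldl searchmaxbMinStep none <;> simp [hf]
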